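-- pv_equiv track=rewrite | github.com/rdb/nim-panda3d | generate.py | translate_type_name
-- ===== SOURCE A (Python) =====
-- ATOMIC_TYPES = ["object", "int", "float32", "float64", "bool", "char", "void", "string", "clonglong", "type(nil)"]
--
-- def translate_type_name(name, mangle=False):
--     if name == "int":
--         return ATOMIC_TYPES[1]
--     elif name == "float":
--         return ATOMIC_TYPES[2]
--     elif name == "double":
--         return ATOMIC_TYPES[3]
--     elif name == "time_t":
--         return "Time"
--     elif (name.startswith("int") or name.startswith("uint")) and name.endswith("_t"):
--         return name.rstrip("_t")
--
--     # Equivalent to C++ classNameFromCppName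
--     class_name = ""
--     bad_chars = "!@#$%^&*()<>,.-=+~{}? "
--     next_cap = False
--     first_char = mangle
--
--     for chr in name:
--         if (chr == '_' or chr == ' ') and mangle:
--             next_cap = True
--         elif chr in bad_chars:
--             if not mangle:
--                 class_name += '_'
--         elif next_cap or first_char:
--             class_name += chr.upper()
--             next_cap = False
--             first_char = False
--         else:
--             class_name += chr
--
--     return class_name
-- ===== SOURCE B (Python) =====
-- ATOMIC_TYPES = ["object", "int", "float32", "float64", "bool", "char", "void", "string", "clonglong", "type(nil)"]
--
-- def translate_type_name(name, mangle=False):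
--     if name == "int":
--         return ATOMIC_TYPES[1]
--     elif name == "float":
--         return ATOMIC_TYPES[2]
--     elif name == "double":
--         return ATOMIC_TYPES[3]
--     elif name == "time_t":
--         return "Time"
--     elif (name.startswith("int") or name.startswith("uint")) and name.endswith("_t"):
--         return name.rstrip("_t")
--
--     bad_chars = "!@#$%^&*()<>,.-=+~{}? "
--     if not mangle:
--         return "".join('_' if c in bad_chars else c for c in name)
--     # mangle: drop bad chars (they never trigger capitalization), normalize
--     # underscore/space separators to a space, tokenize, capitalize token heads.
--     kept = "".join(' ' if c in '_ ' else c for c in name if c not in "!@#$%^&*()<>,.-=+~{}?")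
--     return "".join(t[0].upper() + t[1:] for t in kept.split(' ') if t)
-- ===== Notes on version B (the rewrite author's own statement) =====
-- stated objective: simpler
-- what changed: Replaces the single mutable-state character loop (next_cap/first_char flags) by a declarative pipeline: non-mangle mode becomes a plain per-character substitution map, and mangle mode strips bad characters, normalizes both separator characters to a space, splits into tokens and capitalizes each token head before joining.
import Mathlib
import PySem

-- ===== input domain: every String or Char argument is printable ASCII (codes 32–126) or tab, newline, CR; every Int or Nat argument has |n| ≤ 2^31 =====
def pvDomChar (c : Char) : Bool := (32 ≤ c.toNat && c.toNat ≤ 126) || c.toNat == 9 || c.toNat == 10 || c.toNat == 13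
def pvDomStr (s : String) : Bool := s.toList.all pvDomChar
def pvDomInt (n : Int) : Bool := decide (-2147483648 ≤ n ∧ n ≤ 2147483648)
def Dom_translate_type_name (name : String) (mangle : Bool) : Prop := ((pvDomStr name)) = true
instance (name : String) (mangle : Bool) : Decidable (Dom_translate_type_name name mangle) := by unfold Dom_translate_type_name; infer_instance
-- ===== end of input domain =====

-- B replaces A's mutable-flag character loop by a map (non-mangle) / filter-normalize-split-capitalize-join pipeline (mangle); objective: simpler.


-- ===== PORT A =====
def pvATOMIC_TYPES : List String :=
  ["object", "int", "float32", "float64", "bool", "char", "void", "string", "clonglong", "type(nil)"]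

def pvBadChars : List Char := ['!','@','#','$','%','^','&','*','(',')','<','>',',','.','-','=','+','~','{','}','?',' ']  -- the chars of "!@#$%^&*()<>,.-=+~{}? "

-- hand port of Python's name.rstrip("_t") (drops ALL trailing '_'/'t' characters): exact
def pvRstripUT (cs : List Char) : List Char :=
  (cs.reverse.dropWhile (fun c => c == '_' || c == 't')).reverse

def translate_type_name (name : String) (mangle : Bool) : String :=
  if name == "int" then PySem.List.pyGetD pvATOMIC_TYPES 1 ""
  else if name == "float" then PySem.List.pyGetD pvATOMIC_TYPES 2 ""
  else if name == "double" then PySem.List.pyGetD pvATOMIC_TYPES 3 ""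
  else if name == "time_t" then "Time"
  else if (PySem.Str.startswith name "int" || PySem.Str.startswith name "uint")
          && PySem.Str.endswith name "_t" then
    String.mk (pvRstripUT name.toList)
  else
    -- for chr in name: with state (class_name, next_cap, first_char)
    String.mk ((name.toList.foldl
      (fun (st : List Char × Bool × Bool) c =>
        if (c == '_' || c == ' ') && mangle then (st.1, true, st.2.2)
        else if pvBadChars.contains c then
          (if mangle then st else (st.1 ++ ['_'], st.2.1, st.2.2))
        else if st.2.1 || st.2.2 then (st.1 ++ [PySem.Chars.upperChar c], false, false)
        else (st.1 ++ [c], st.2.1, st.2.2))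
      ([], false, mangle)).1)

-- ===== PORT B =====
def pvBadNoSpace : List Char := ['!','@','#','$','%','^','&','*','(',')','<','>',',','.','-','=','+','~','{','}','?']  -- the chars of "!@#$%^&*()<>,.-=+~{}?"

def translate_type_name_alt (name : String) (mangle : Bool) : String :=
  if name == "int" then PySem.List.pyGetD pvATOMIC_TYPES 1 ""
  else if name == "float" then PySem.List.pyGetD pvATOMIC_TYPES 2 ""
  else if name == "double" then PySem.List.pyGetD pvATOMIC_TYPES 3 ""
  else if name == "time_t" then "Time"
  else if (PySem.Str.startswith name "int" || PySem.Str.startswith name "uint")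
          && PySem.Str.endswith name "_t" then
    String.mk (pvRstripUT name.toList)
  else if !mangle then
    String.mk (name.toList.map (fun c => if pvBadChars.contains c then '_' else c))
  else
    let kept := (name.toList.filter (fun c => !pvBadNoSpace.contains c)).map
      (fun c => if c == '_' || c == ' ' then ' ' else c)
    String.mk (PySem.Chars.join []
      (((PySem.Chars.splitOn kept [' ']).filter (fun t => !t.isEmpty)).map
        (fun t => match t with
          | [] => []
          | c :: cs => PySem.Chars.upperChar c :: cs)))

-- ===== PRECONDITION & SPEC =====
def Spec_translate_type_name (name : String) (mangle : Bool) (out : String) : Prop := out = translate_type_name_alt name mangle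
instance (name : String) (mangle : Bool) (out : String) : Decidable (Spec_translate_type_name name mangle out) := by unfold Spec_translate_type_name; infer_instance

-- ===== CLAIM (what is proved, stated in full; the proofs are below) =====
def Claim_equal_translate_type_name : Prop := ∀ (name : String) (mangle : Bool), Dom_translate_type_name name mangle → Spec_translate_type_name name mangle (translate_type_name name mangle)



-- ===== LEMMAS AND PROOFS =====

-- A's loop body, named so the loop lemmas below can be stated and rewritten cleanly
def pvStep (mangle : Bool) (st : List Char × Bool × Bool) (c : Char) : List Char × Bool × Bool :=
  if (c == '_' || c == ' ') && mangle then (st.1, true, st.2.2)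
  else if pvBadChars.contains c then
    (if mangle then st else (st.1 ++ ['_'], st.2.1, st.2.2))
  else if st.2.1 || st.2.2 then (st.1 ++ [PySem.Chars.upperChar c], false, false)
  else (st.1 ++ [c], st.2.1, st.2.2)

-- A's loop in mangle mode: only (next_cap || first_char) matters
def pvCapProc : List Char → Bool → List Char
  | [], _ => []
  | c :: cs, cap =>
    if c == '_' || c == ' ' then pvCapProc cs true
    else if pvBadChars.contains c then pvCapProc cs cap
    else (if cap then PySem.Chars.upperChar c else c) :: pvCapProc cs false

-- Python str.split(' ') on char lists (keeps empty pieces)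
def pvSplitSp : List Char → List (List Char)
  | [] => [[]]
  | c :: cs =>
    if c = ' ' then [] :: pvSplitSp cs
    else
      match pvSplitSp cs with
      | [] => [[c]]
      | t :: ts => (c :: t) :: ts

-- B's tail end of the pipeline: capitalize token heads and concatenate
def pvF (ts : List (List Char)) : List Char :=
  ((ts.filter (fun t => !t.isEmpty)).map
    (fun t => match t with
      | [] => []
      | c :: cs => PySem.Chars.upperChar c :: cs)).flatten

-- B's filter+normalize pass
def pvP (cs : List Char) : List Char :=
  (cs.filter (fun c => !pvBadNoSpace.contains c)).map
    (fun c => if c == '_' || c == ' ' then ' ' else c)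

theorem pvStep_F_bad (acc : List Char) (b1 b2 : Bool) (c : Char)
    (hb : pvBadChars.contains c = true) :
    pvStep false (acc, b1, b2) c = (acc ++ ['_'], b1, b2) := by
  simp_all [pvStep]

theorem pvStep_F_good (acc : List Char) (c : Char)
    (hb : pvBadChars.contains c = false) :
    pvStep false (acc, false, false) c = (acc ++ [c], false, false) := by
  simp_all [pvStep]

theorem pvStep_T_sep (acc : List Char) (nc fc : Bool) (c : Char)
    (hs : (c == '_' || c == ' ') = true) :
    pvStep true (acc, nc, fc) c = (acc, true, fc) := by
  simp_all [pvStep]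

theorem pvStep_T_bad (acc : List Char) (nc fc : Bool) (c : Char)
    (hs : (c == '_' || c == ' ') = false) (hb : pvBadChars.contains c = true) :
    pvStep true (acc, nc, fc) c = (acc, nc, fc) := by
  simp_all [pvStep]

theorem pvStep_T_cap (acc : List Char) (nc fc : Bool) (c : Char)
    (hs : (c == '_' || c == ' ') = false) (hb : pvBadChars.contains c = false)
    (hcap : (nc || fc) = true) :
    pvStep true (acc, nc, fc) c = (acc ++ [PySem.Chars.upperChar c], false, false) := by
  simp_all [pvStep]

theorem pvStep_T_norm (acc : List Char) (nc fc : Bool) (c : Char)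
    (hs : (c == '_' || c == ' ') = false) (hb : pvBadChars.contains c = false)
    (hcap : (nc || fc) = false) :
    pvStep true (acc, nc, fc) c = (acc ++ [c], nc, fc) := by
  simp_all [pvStep]

theorem pv_loopF (cs : List Char) (acc : List Char) :
    cs.foldl (pvStep false) (acc, false, false)
    = (acc ++ cs.map (fun c => if pvBadChars.contains c then '_' else c), false, false) := by
  induction cs generalizing acc with
  | nil => simp
  | cons c cs ih =>
    rw [List.foldl_cons]
    cases hb : pvBadChars.contains c with
    | true =>
      have hb' : c ∈ pvBadChars := by simpa using hb
      rw [pvStep_F_bad acc false false c hb, ih]; simp [hb']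
    | false =>
      have hb' : c ∉ pvBadChars := by simpa using hb
      rw [pvStep_F_good acc c hb, ih]; simp [hb']

theorem pv_loopT (cs : List Char) (acc : List Char) (nc fc : Bool) :
    (cs.foldl (pvStep true) (acc, nc, fc)).1 = acc ++ pvCapProc cs (nc || fc) := by
  induction cs generalizing acc nc fc with
  | nil => simp [pvCapProc]
  | cons c cs ih =>
    rw [List.foldl_cons]
    cases hs : (c == '_' || c == ' ') with
    | true =>
      have hs' : c = '_' ∨ c = ' ' := by simpa using hs
      rw [pvStep_T_sep acc nc fc c hs, ih]
      simp [pvCapProc, hs']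
    | false =>
      have hs' : ¬(c = '_' ∨ c = ' ') := by simpa using hs
      cases hb : pvBadChars.contains c with
      | true =>
        have hb' : c ∈ pvBadChars := by simpa using hb
        rw [pvStep_T_bad acc nc fc c hs hb, ih]
        simp [pvCapProc, hs', hb']
      | false =>
        have hb' : c ∉ pvBadChars := by simpa using hb
        cases hcap : (nc || fc) with
        | true =>
          have hcap' : nc = true ∨ fc = true := by simpa using hcap
          rw [pvStep_T_cap acc nc fc c hs hb hcap, ih]
          simp [pvCapProc, hs', hb', hcap, hcap']
        | false =>
          have hcap' : ¬(nc = true ∨ fc = true) := by simpa using hcap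
          rw [pvStep_T_norm acc nc fc c hs hb hcap, ih]
          simp [pvCapProc, hs', hb', hcap, hcap']

theorem pv_splitSp_ne_nil (l : List Char) : pvSplitSp l ≠ [] := by
  cases l with
  | nil => simp [pvSplitSp]
  | cons c cs =>
    simp only [pvSplitSp]
    split
    · simp
    · split <;> simp

theorem pv_splitSp_cons (l : List Char) :
    ∃ t ts, pvSplitSp l = t :: ts := by
  cases h : pvSplitSp l with
  | nil => exact absurd h (pv_splitSp_ne_nil l)
  | cons t ts => exact ⟨t, ts, rfl⟩

theorem pv_join_nil_eq_flatten (ts : List (List Char)) :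
    PySem.Chars.join [] ts = ts.flatten := by
  induction ts with
  | nil => rfl
  | cons t ts ih =>
    cases ts with
    | nil => simp [PySem.Chars.join, List.intercalate]
    | cons u us =>
      rw [PySem.Chars.join_cons_cons]
      simp [ih]

theorem pv_go_spec (fuel : Nat) :
    ∀ (l : List Char), l.length < fuel → ∀ (cur : List Char) (acc : List (List Char)),
    PySem.Chars.splitOn.go [' '] fuel l cur acc
      = acc.reverse ++ (cur.reverse ++ (pvSplitSp l).headI) :: (pvSplitSp l).tail := by
  induction fuel with
  | zero => intro l hl; omega
  | succ n ih =>
    intro l hl cur acc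
    cases l with
    | nil => simp [PySem.Chars.splitOn.go, pvSplitSp]
    | cons c rest =>
      rw [PySem.Chars.splitOn.go]
      by_cases hc : c = ' '
      · subst hc
        rw [if_pos (by simp [List.isPrefixOf])]
        rw [show List.drop [' '].length (' ' :: rest) = rest from rfl]
        rw [ih rest (by simpa using Nat.lt_of_succ_lt_succ hl) [] (cur.reverse :: acc)]
        obtain ⟨t, ts, hts⟩ := pv_splitSp_cons rest
        simp [pvSplitSp, hts]
      · rw [if_neg (by simp [List.isPrefixOf]; exact fun h => hc h.symm)]
        rw [ih rest (by simpa using Nat.lt_of_succ_lt_succ hl) (c :: cur) acc]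
        obtain ⟨t, ts, hts⟩ := pv_splitSp_cons rest
        simp [pvSplitSp, hts, hc]

theorem pv_splitOn_eq (l : List Char) :
    PySem.Chars.splitOn l [' '] = pvSplitSp l := by
  rw [PySem.Chars.splitOn, pv_go_spec (l.length + 1) l (Nat.lt_succ_self _) [] []]
  obtain ⟨t, ts, hts⟩ := pv_splitSp_cons l
  simp [hts]

theorem pv_F_nil_cons (ts : List (List Char)) : pvF ([] :: ts) = pvF ts := by
  simp [pvF]

theorem pv_F_cons (c : Char) (t : List Char) (ts : List (List Char)) :
    pvF ((c :: t) :: ts) = (PySem.Chars.upperChar c :: t) ++ pvF ts := by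
  simp [pvF]

-- character-class facts about the two literal bad-char lists
theorem pv_bad_of_badNoSpace (c : Char) (h : c ∈ pvBadNoSpace) :
    c ∈ pvBadChars ∧ ¬(c = '_' ∨ c = ' ') := by
  fin_cases h <;> exact ⟨by decide, by decide⟩

theorem pv_not_bad (c : Char) (h1 : ¬ c ∈ pvBadNoSpace) (h2 : ¬(c = '_' ∨ c = ' ')) :
    ¬ c ∈ pvBadChars := by
  intro h
  fin_cases h <;> revert h1 h2 <;> decide

theorem pv_capProc_eq_pipeline (cs : List Char) :
    pvCapProc cs true = pvF (pvSplitSp (pvP cs))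
    ∧ pvCapProc cs false
      = (pvSplitSp (pvP cs)).headI ++ pvF ((pvSplitSp (pvP cs)).tail) := by
  induction cs with
  | nil => simp [pvCapProc, pvP, pvSplitSp, pvF]
  | cons c cs ih =>
    by_cases hb : c ∈ pvBadNoSpace
    · obtain ⟨hbc, hns⟩ := pv_bad_of_badNoSpace c hb
      have hp : pvP (c :: cs) = pvP cs := by simp [pvP, hb]
      constructor <;> simp [pvCapProc, hns, hbc, hp, ih.1, ih.2]
    · by_cases hsep : c = '_' ∨ c = ' '
      · have hp' : pvP (c :: cs) = ' ' :: pvP cs := by simp [pvP, hb, hsep]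
        have hsp : pvSplitSp (pvP (c :: cs)) = [] :: pvSplitSp (pvP cs) := by
          rw [hp']; simp [pvSplitSp]
        constructor <;> simp [pvCapProc, hsep, hsp, pv_F_nil_cons, ih.1]
      · have hp' : pvP (c :: cs) = c :: pvP cs := by simp [pvP, hb, hsep]
        obtain ⟨t, ts, hts⟩ := pv_splitSp_cons (pvP cs)
        have hcs : ¬ c = ' ' := fun h => hsep (Or.inr h)
        have hsp : pvSplitSp (pvP (c :: cs)) = (c :: t) :: ts := by
          rw [hp']; simp [pvSplitSp, hts, hcs]
        have hbad : ¬ c ∈ pvBadChars := pv_not_bad c hb hsep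
        constructor
        · simp [pvCapProc, hsep, hbad, hsp, pv_F_cons, ih.2, hts]
        · simp [pvCapProc, hsep, hbad, hsp, ih.2, hts]

theorem pv_mangle_main (l : List Char) :
    pvCapProc l true
      = PySem.Chars.join []
          (((PySem.Chars.splitOn
                ((l.filter (fun c => !pvBadNoSpace.contains c)).map
                  (fun c => if c == '_' || c == ' ' then ' ' else c)) [' ']).filter
              (fun t => !t.isEmpty)).map
            (fun t => match t with
              | [] => []
              | c :: cs => PySem.Chars.upperChar c :: cs)) := by
  rw [pv_join_nil_eq_flatten, pv_splitOn_eq]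
  exact (pv_capProc_eq_pipeline l).1

-- ===== VERDICT (by name: the statement is the Claim_ definition above) =====
theorem translate_type_name_spec : Claim_equal_translate_type_name := by
  intro name mangle _
  show translate_type_name name mangle = translate_type_name_alt name mangle
  unfold translate_type_name translate_type_name_alt
  refine if_congr Iff.rfl rfl (if_congr Iff.rfl rfl (if_congr Iff.rfl rfl
    (if_congr Iff.rfl rfl (if_congr Iff.rfl rfl ?_))))
  cases mangle with
  | false =>
    rw [if_pos (show (!false) = true from rfl)]
    exact congrArg (fun p => String.mk p.1) (pv_loopF name.toList [])
  | true =>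
    rw [if_neg (show ¬(!true) = true from by decide)]
    exact congrArg String.mk ((pv_loopT name.toList [] false true).trans
      (pv_mangle_main name.toList))
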